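-- pv_equiv track=rewrite | github.com/MrBrantCode/unitest_baseline | mut_generate/mist_train_cf/cf_55477/solution.py | generate_3d_array
-- ===== SOURCE A (Python) =====
-- def generate_3d_array(m):
--     # Initialize an empty 3d array
--     three_d_array = [[[0 for _ in range(m)] for _ in range(m)] for _ in range(m)]
--
--     # Variable to hold the current number
--     curr_num = 1
--
--     # Populate the 3d array from back to front, top to bottom, left to right
--     for depth in range(m):
--         for row in range(m):
--             for col in range(m):
--                 three_d_array[depth][row][col] = curr_num
--                 curr_num += 1
--
--     return three_d_array
-- ===== SOURCE B (Python) =====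
-- def generate_3d_array(m):
--     # Build the full linear sequence once, then partition it into the cube by slicing.
--     flat = list(range(1, m ** 3 + 1))
--     return [[flat[d * m * m + r * m: d * m * m + r * m + m] for r in range(m)]
--             for d in range(m)]
-- ===== Notes on version B (the rewrite author's own statement) =====
-- stated objective: simpler
-- what changed: Replaces the pre-allocated zero cube mutated cell-by-cell with a threaded counter by materializing the flat sequence 1..m^3 once and partitioning it into rows by slicing; no mutation and no counter.
import Mathlib
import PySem

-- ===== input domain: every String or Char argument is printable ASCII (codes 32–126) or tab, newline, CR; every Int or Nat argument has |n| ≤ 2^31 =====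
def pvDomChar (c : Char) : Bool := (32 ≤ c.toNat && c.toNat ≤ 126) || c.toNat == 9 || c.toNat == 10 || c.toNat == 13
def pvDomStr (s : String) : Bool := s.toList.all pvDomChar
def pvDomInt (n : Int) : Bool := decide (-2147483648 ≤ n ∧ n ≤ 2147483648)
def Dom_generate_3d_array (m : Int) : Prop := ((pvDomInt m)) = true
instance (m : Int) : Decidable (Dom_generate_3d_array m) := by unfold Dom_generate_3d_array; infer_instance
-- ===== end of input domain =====

-- B replaces A's zero-initialized cube mutated cell-by-cell with a threaded counter by building the
-- flat sequence 1..m^3 once and slicing it into rows (simpler: no mutation, no counter).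

-- ===== PORT A =====
-- range(m) iterates 0,1,…,m-1 and is empty for m ≤ 0, i.e. List.range m.toNat : exact.
-- Each `for` loop is a fold; the assignment three_d_array[depth][row][col] = curr_num
-- (indices nonnegative and in range) is List.modify / List.set at those indices: exact.
def aZeros (n : Nat) : List (List (List Int)) :=
  (List.range n).map (fun _ => (List.range n).map (fun _ => (List.range n).map (fun _ => (0 : Int))))

-- innermost loop: for col in range(m)
def aColLoop (n d r : Nat) (st : List (List (List Int)) × Int) : List (List (List Int)) × Int :=
  (List.range n).foldl
    (fun st c => (st.1.modify d (fun plane => plane.modify r (fun line => line.set c st.2)), st.2 + 1)) st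

-- for row in range(m)
def aRowLoop (n d : Nat) (st : List (List (List Int)) × Int) : List (List (List Int)) × Int :=
  (List.range n).foldl (fun st r => aColLoop n d r st) st

-- for depth in range(m)
def aDepthLoop (n : Nat) (st : List (List (List Int)) × Int) : List (List (List Int)) × Int :=
  (List.range n).foldl (fun st d => aRowLoop n d st) st

def generate_3d_array (m : Int) : List (List (List Int)) :=
  (aDepthLoop m.toNat (aZeros m.toNat, 1)).1

-- ===== PORT B =====
-- flat = list(range(1, m**3 + 1)); rows are contiguous slices flat[d*m*m+r*m : d*m*m+r*m+m].
def generate_3d_array_alt (m : Int) : List (List (List Int)) :=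
  let flat : List Int := PySem.List.pyRange 1 (m ^ 3 + 1) 1
  (List.range m.toNat).map (fun (d : Nat) =>
    (List.range m.toNat).map (fun (r : Nat) =>
      PySem.List.slice flat (some ((d : Int) * m * m + (r : Int) * m))
        (some ((d : Int) * m * m + (r : Int) * m + m))))

-- ===== PRECONDITION & SPEC =====
def Spec_generate_3d_array (m : Int) (out : List (List (List Int))) : Prop := out = generate_3d_array_alt m
instance (m : Int) (out : List (List (List Int))) : Decidable (Spec_generate_3d_array m out) := by unfold Spec_generate_3d_array; infer_instance

-- ===== CLAIM (what is proved, stated in full; the proofs are below) =====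
def Claim_equal_generate_3d_array : Prop := ∀ (m : Int), Dom_generate_3d_array m → Spec_generate_3d_array m (generate_3d_array m)

-- ===== LEMMAS AND PROOFS =====

theorem pv_modify_modify {α : Type} (l : List α) (i : Nat) (f g : α → α) :
    (l.modify i f).modify i g = l.modify i (fun x => g (f x)) := by
  induction l generalizing i with
  | nil => simp
  | cons a t ih => cases i <;> simp [List.modify_succ_cons, List.modify_zero_cons, ih]

theorem pv_modify_append_cons {α : Type} (l1 l2 : List α) (x : α) (f : α → α) :
    (l1 ++ x :: l2).modify l1.length f = l1 ++ f x :: l2 := by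
  induction l1 with
  | nil => simp [List.modify_zero_cons]
  | cons a t ih => simp [List.modify_succ_cons, ih]

theorem pv_modify_id {α : Type} (l : List α) (i : Nat) :
    l.modify i (fun x => x) = l := by
  induction l generalizing i with
  | nil => simp
  | cons a t ih => cases i <;> simp [List.modify_succ_cons, List.modify_zero_cons, ih]

-- the counter after k steps of any loop that adds δ each iteration
theorem pv_foldl_snd {β : Type} (g : Nat → Int → β → β) (δ : Int) :
    ∀ (k : Nat) (x : β) (curr : Int),
      ((List.range k).foldl (fun (st : β × Int) i => (g i st.2 st.1, st.2 + δ)) (x, curr)).2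
        = curr + k * δ := by
  intro k
  induction k with
  | zero => simp
  | succ k ih =>
    intro x curr
    rw [List.range_succ, List.foldl_append]
    have h := ih x curr
    rcases hst : (List.range k).foldl (fun (st : β × Int) i => (g i st.2 st.1, st.2 + δ)) (x, curr)
      with ⟨a, c⟩
    rw [hst] at h
    simp only [List.foldl_cons, List.foldl_nil] at h ⊢
    rw [h]
    push_cast
    ring

-- loops whose every step modifies the SAME outer index d factor through that modify
theorem pv_lift {β : Type} (g : Nat → Int → β → β) (δ : Int) (d : Nat) :
    ∀ (k : Nat) (arr : List β) (curr : Int),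
      (List.range k).foldl (fun (st : List β × Int) i => (st.1.modify d (g i st.2), st.2 + δ)) (arr, curr)
        = (arr.modify d (fun x =>
             ((List.range k).foldl (fun (st : β × Int) i => (g i st.2 st.1, st.2 + δ)) (x, curr)).1),
           curr + k * δ) := by
  intro k
  induction k with
  | zero => intro arr curr; simp [pv_modify_id]
  | succ k ih =>
    intro arr curr
    rw [List.range_succ, List.foldl_append, ih]
    simp only [List.foldl_cons, List.foldl_nil]
    rw [pv_modify_modify]
    refine Prod.ext ?_ ?_
    · simp only []
      congr 1
      funext x
      rw [List.foldl_append]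
      simp only [List.foldl_cons, List.foldl_nil]
      rw [pv_foldl_snd]
    · simp only []
      push_cast
      ring

-- a loop that writes slot i of xs on iteration i, with a value depending only on the counter
theorem pv_genFold {β : Type} (F : Int → β → β) (V : Int → β) (δ : Int) (xs : List β)
    (hF : ∀ x ∈ xs, ∀ c, F c x = V c) :
    ∀ (k : Nat), k ≤ xs.length → ∀ (curr : Int),
      (List.range k).foldl (fun (st : List β × Int) i => (st.1.modify i (F st.2), st.2 + δ)) (xs, curr)
        = ((List.range k).map (fun (i : Nat) => V (curr + (i : Int) * δ)) ++ xs.drop k, curr + k * δ) := by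
  intro k
  induction k with
  | zero => intro _ curr; simp
  | succ k ih =>
    intro hk curr
    rw [List.range_succ, List.foldl_append, ih (by omega) curr]
    simp only [List.foldl_cons, List.foldl_nil]
    have hlt : k < xs.length := by omega
    rw [List.drop_eq_getElem_cons hlt]
    have hlen : ((List.range k).map (fun (i : Nat) => V (curr + (i : Int) * δ))).length = k := by simp
    have hmod := pv_modify_append_cons ((List.range k).map (fun (i : Nat) => V (curr + (i : Int) * δ)))
      (xs.drop (k + 1)) (xs[k]) (F (curr + (k : Int) * δ))
    rw [hlen] at hmod
    rw [hmod, hF _ (List.getElem_mem hlt)]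
    rw [List.map_append]
    refine Prod.ext ?_ ?_
    · simp
    · simp only []
      push_cast
      ring

theorem pv_line_eq (n : Nat) (line : List Int) (h : line.length = n) (curr : Int) :
    ((List.range n).foldl (fun (st : List Int × Int) c => (st.1.set c st.2, st.2 + 1)) (line, curr)).1
      = (List.range n).map (fun (c : Nat) => curr + (c : Int)) := by
  have hstep : (fun (st : List Int × Int) c => (st.1.set c st.2, st.2 + 1))
      = (fun (st : List Int × Int) c => (st.1.modify c (fun _ => st.2), st.2 + 1)) := by
    funext st c
    rw [List.modify_eq_set]
  rw [hstep]
  have hg := pv_genFold (F := fun c (_ : Int) => c) (V := fun c => c) 1 line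
    (fun _ _ _ => rfl) n (by omega) curr
  have hdrop : line.drop n = [] := by rw [← h]; exact List.drop_length
  simpa [hdrop] using congrArg Prod.fst hg

theorem pv_aColLoop_eq (n d r : Nat) (arr : List (List (List Int))) (curr : Int) :
    aColLoop n d r (arr, curr)
      = (arr.modify d (fun plane => plane.modify r (fun line =>
           ((List.range n).foldl (fun (st : List Int × Int) c => (st.1.set c st.2, st.2 + 1)) (line, curr)).1)),
         curr + n) := by
  have h1 : aColLoop n d r (arr, curr)
      = (arr.modify d (fun plane =>
          ((List.range n).foldl (fun (st : List (List Int) × Int) c =>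
             (st.1.modify r (fun line => line.set c st.2), st.2 + 1)) (plane, curr)).1),
         curr + (n : Int) * 1) :=
    pv_lift (g := fun (c : Nat) (cur : Int) (plane : List (List Int)) => plane.modify r (fun line => line.set c cur)) 1 d n arr curr
  rw [h1]
  refine Prod.ext ?_ ?_
  · simp only []
    congr 1
    funext plane
    have h2 : ((List.range n).foldl (fun (st : List (List Int) × Int) c =>
             (st.1.modify r (fun line => line.set c st.2), st.2 + 1)) (plane, curr))
        = (plane.modify r (fun line =>
            ((List.range n).foldl (fun (st : List Int × Int) c => (st.1.set c st.2, st.2 + 1))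
              (line, curr)).1),
           curr + (n : Int) * 1) :=
      pv_lift (g := fun (c : Nat) (cur : Int) (line : List Int) => line.set c cur) 1 r n plane curr
    rw [h2]
  · simp only []
    rw [mul_one]

theorem pv_aRowLoop_eq (n d : Nat) (arr : List (List (List Int))) (curr : Int) :
    aRowLoop n d (arr, curr)
      = (arr.modify d (fun plane =>
           ((List.range n).foldl (fun (st : List (List Int) × Int) r =>
              (st.1.modify r (fun line =>
                ((List.range n).foldl (fun (st : List Int × Int) c => (st.1.set c st.2, st.2 + 1)) (line, st.2)).1),
               st.2 + n)) (plane, curr)).1),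
         curr + n * n) := by
  have hstep : (fun (st : List (List (List Int)) × Int) r => aColLoop n d r st)
      = (fun (st : List (List (List Int)) × Int) r =>
          (st.1.modify d (fun plane => plane.modify r (fun line =>
            ((List.range n).foldl (fun (st : List Int × Int) c => (st.1.set c st.2, st.2 + 1))
              (line, st.2)).1)),
           st.2 + (n : Int))) := by
    funext st r
    rcases st with ⟨a, c⟩
    exact pv_aColLoop_eq n d r a c
  show ((List.range n).foldl (fun st r => aColLoop n d r st) (arr, curr)) = _
  rw [hstep]
  exact pv_lift (g := fun (r : Nat) (cur : Int) (plane : List (List Int)) => plane.modify r (fun line =>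
    ((List.range n).foldl (fun (st : List Int × Int) c => (st.1.set c st.2, st.2 + 1))
      (line, cur)).1)) (n : Int) d n arr curr

theorem pv_plane_eq (n : Nat) (plane : List (List Int)) (hp : plane.length = n)
    (hl : ∀ l ∈ plane, l.length = n) (curr : Int) :
    ((List.range n).foldl (fun (st : List (List Int) × Int) r =>
        (st.1.modify r (fun line =>
          ((List.range n).foldl (fun (st : List Int × Int) c => (st.1.set c st.2, st.2 + 1)) (line, st.2)).1),
         st.2 + n)) (plane, curr)).1
      = (List.range n).map (fun (r : Nat) => (List.range n).map (fun (c : Nat) => curr + (r : Int) * (n : Int) + (c : Int))) := by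
  have hg := pv_genFold
    (F := fun (cur : Int) (line : List Int) => ((List.range n).foldl
      (fun (st : List Int × Int) c => (st.1.set c st.2, st.2 + 1)) (line, cur)).1)
    (V := fun cur => (List.range n).map (fun (c : Nat) => cur + (c : Int))) (n : Int) plane
    (fun l hlmem c => pv_line_eq n l (hl l hlmem) c) n (by omega) curr
  have hdrop : plane.drop n = [] := by rw [← hp]; exact List.drop_length
  simpa [hdrop] using congrArg Prod.fst hg

theorem pv_A_char (m : Int) :
    generate_3d_array m
      = (List.range m.toNat).map (fun (d : Nat) =>
          (List.range m.toNat).map (fun (r : Nat) =>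
            (List.range m.toNat).map (fun (c : Nat) =>
              ((1 : Int) + (d : Int) * ((m.toNat : Int) * (m.toNat : Int)) + (r : Int) * (m.toNat : Int) + (c : Int))))) := by
  have hstep : (fun (st : List (List (List Int)) × Int) d => aRowLoop m.toNat d st)
      = (fun (st : List (List (List Int)) × Int) d =>
          (st.1.modify d (fun plane =>
            ((List.range m.toNat).foldl (fun (st : List (List Int) × Int) r =>
              (st.1.modify r (fun line =>
                ((List.range m.toNat).foldl
                  (fun (st : List Int × Int) c => (st.1.set c st.2, st.2 + 1)) (line, st.2)).1),
               st.2 + (m.toNat : Int))) (plane, st.2)).1),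
           st.2 + (m.toNat : Int) * (m.toNat : Int))) := by
    funext st d
    rcases st with ⟨a, c⟩
    exact pv_aRowLoop_eq m.toNat d a c
  have hshape : ∀ plane ∈ aZeros m.toNat, ∀ cur : Int,
      ((List.range m.toNat).foldl (fun (st : List (List Int) × Int) r =>
        (st.1.modify r (fun line =>
          ((List.range m.toNat).foldl
            (fun (st : List Int × Int) c => (st.1.set c st.2, st.2 + 1)) (line, st.2)).1),
         st.2 + (m.toNat : Int))) (plane, cur)).1
      = (List.range m.toNat).map (fun (r : Nat) => (List.range m.toNat).map (fun (c : Nat) =>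
          cur + (r : Int) * (m.toNat : Int) + (c : Int))) := by
    intro plane hmem cur
    unfold aZeros at hmem
    rcases List.mem_map.1 hmem with ⟨_, _, rfl⟩
    refine pv_plane_eq m.toNat _ (by simp) ?_ cur
    intro l hlmem
    rcases List.mem_map.1 hlmem with ⟨_, _, rfl⟩
    simp
  have hg := pv_genFold
    (F := fun (cur : Int) (plane : List (List Int)) =>
      ((List.range m.toNat).foldl (fun (st : List (List Int) × Int) r =>
        (st.1.modify r (fun line =>
          ((List.range m.toNat).foldl
            (fun (st : List Int × Int) c => (st.1.set c st.2, st.2 + 1)) (line, st.2)).1),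
         st.2 + (m.toNat : Int))) (plane, cur)).1)
    (V := fun cur => (List.range m.toNat).map (fun (r : Nat) => (List.range m.toNat).map (fun (c : Nat) =>
        cur + (r : Int) * (m.toNat : Int) + (c : Int))))
    ((m.toNat : Int) * (m.toNat : Int)) (aZeros m.toNat)
    (fun plane hmem cur => hshape plane hmem cur) m.toNat (by simp [aZeros]) 1
  have hdrop : (aZeros m.toNat).drop m.toNat = [] := by
    apply List.drop_eq_nil_of_le
    simp [aZeros]
  show (aDepthLoop m.toNat (aZeros m.toNat, 1)).1 = _
  unfold aDepthLoop
  rw [hstep]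
  simpa [hdrop] using congrArg Prod.fst hg

theorem pv_slice_pyRange (u v a b : Int) (h0 : 0 ≤ a) (hab : a ≤ b) (hb : u + b ≤ v) :
    PySem.List.slice (PySem.List.pyRange u v 1) (some a) (some b)
      = PySem.List.pyRange (u + a) (u + b) 1 := by
  rw [PySem.List.slice_toNat _ h0 (le_trans h0 hab)]
  apply List.ext_getElem
  · simp only [List.length_take, List.length_drop, PySem.List.length_pyRange_one]
    omega
  · intro i h1 h2
    rw [List.getElem_take, List.getElem_drop, PySem.List.getElem_pyRange_one]
    · rw [PySem.List.getElem_pyRange_one]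
      push_cast
      simp only [List.length_take, List.length_drop, PySem.List.length_pyRange_one] at h1
      omega

theorem pv_B_char (m : Int) (hm : 0 < m) :
    generate_3d_array_alt m
      = (List.range m.toNat).map (fun (d : Nat) =>
          (List.range m.toNat).map (fun (r : Nat) =>
            (List.range m.toNat).map (fun (c : Nat) =>
              (1 + ((d : Int) * m * m + (r : Int) * m) + (c : Int))))) := by
  rw [show generate_3d_array_alt m
      = (List.range m.toNat).map (fun (d : Nat) =>
          (List.range m.toNat).map (fun (r : Nat) =>
            PySem.List.slice (PySem.List.pyRange 1 (m ^ 3 + 1) 1)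
              (some ((d : Int) * m * m + (r : Int) * m))
              (some ((d : Int) * m * m + (r : Int) * m + m)))) by
    unfold generate_3d_array_alt
    rfl]
  refine List.map_congr_left (fun d hd => ?_)
  refine List.map_congr_left (fun r hr => ?_)
  have hdm : (d : Int) ≤ m - 1 := by
    have := List.mem_range.1 hd
    omega
  have hrm : (r : Int) ≤ m - 1 := by
    have := List.mem_range.1 hr
    omega
  have ha0 : (0 : Int) ≤ (d : Int) * m * m + (r : Int) * m := by positivity
  have hslice := pv_slice_pyRange 1 (m ^ 3 + 1) ((d : Int) * m * m + (r : Int) * m)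
    ((d : Int) * m * m + (r : Int) * m + m) ha0 (by omega)
    (by nlinarith [mul_nonneg (mul_pos hm hm).le (sub_nonneg.2 hdm),
                   mul_nonneg hm.le (sub_nonneg.2 hrm)])
  rw [hslice, PySem.List.pyRange_one]
  have harg : 1 + ((d : Int) * m * m + (r : Int) * m + m) - (1 + ((d : Int) * m * m + (r : Int) * m)) = m := by
    ring
  rw [harg]

-- ===== VERDICT (by name: the statement is the Claim_ definition above) =====
theorem generate_3d_array_spec : Claim_equal_generate_3d_array := by
  intro m _
  unfold Spec_generate_3d_array
  rcases (by omega : m ≤ 0 ∨ 0 < m) with hm | hm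
  · rw [pv_A_char]
    unfold generate_3d_array_alt
    simp [Int.toNat_of_nonpos hm]
  · rw [pv_A_char, pv_B_char m hm]
    have hmn : ((m.toNat : Int)) = m := Int.toNat_of_nonneg hm.le
    refine List.map_congr_left (fun d _ => ?_)
    refine List.map_congr_left (fun r _ => ?_)
    refine List.map_congr_left (fun c _ => ?_)
    rw [hmn]; ring
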